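-- pv_equiv track=rewrite | github.com/remisperando/FDA-dosing | query_openai_mab_dosing.py | group_rows_by_base_name
-- ===== SOURCE A (Python) =====
-- from collections import OrderedDict
--
-- def group_rows_by_base_name(rows: list[dict[str, str]]) -> OrderedDict[str, list[dict[str, str]]]:
--     grouped: dict[str, list[dict[str, str]]] = {}
--     for row in rows:
--         base_name = (row.get("base_name") or "").strip().lower()
--         if not base_name:
--             continue
--         grouped.setdefault(base_name, []).append(row)
--     return OrderedDict((k, grouped[k]) for k in sorted(grouped))
-- ===== SOURCE B (Python) =====
-- from collections import OrderedDict
-- from itertools import groupby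
--
--
-- def group_rows_by_base_name(rows: list[dict[str, str]]) -> "OrderedDict[str, list[dict[str, str]]]":
--     def key(row):
--         return (row.get("base_name") or "").strip().lower()
--
--     ordered = sorted(rows, key=key)  # stable: within-key original order kept
--     return OrderedDict((k, list(g)) for k, g in groupby(ordered, key=key) if k)
-- ===== Notes on version B (the rewrite author's own statement) =====
-- stated objective: idiomatic
-- what changed: B sorts the rows by the normalized key and groups consecutive runs with itertools.groupby (dropping the empty-key run), instead of hash-grouping into a dict and then sorting the key set.
import Mathlib
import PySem

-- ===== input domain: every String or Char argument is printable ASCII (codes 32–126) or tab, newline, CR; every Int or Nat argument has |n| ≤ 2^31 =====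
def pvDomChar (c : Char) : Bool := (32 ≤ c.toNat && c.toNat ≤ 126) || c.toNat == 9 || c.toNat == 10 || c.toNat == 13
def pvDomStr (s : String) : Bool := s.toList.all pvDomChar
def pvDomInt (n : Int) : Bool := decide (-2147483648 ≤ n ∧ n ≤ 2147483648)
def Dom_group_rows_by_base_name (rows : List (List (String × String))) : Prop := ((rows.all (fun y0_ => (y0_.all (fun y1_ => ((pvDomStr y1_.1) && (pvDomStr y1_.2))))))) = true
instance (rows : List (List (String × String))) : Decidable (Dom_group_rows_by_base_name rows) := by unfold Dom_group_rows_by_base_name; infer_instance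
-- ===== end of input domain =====

-- B sorts the rows by the normalized key and groups consecutive runs (itertools.groupby style),
-- instead of A's hash-grouping into a dict followed by sorting the key set. Objective: idiomatic.

-- ===== PORT A =====
-- grouped.setdefault(k, []).append(row)  ==  grouped[k] = grouped.get(k, []) + [row]  ==  Dict.modify
def group_rows_by_base_name (rows : List (List (String × String))) : List (String × List (List (String × String))) :=
  let grouped : PySem.Dict String (List (List (String × String))) :=
    rows.foldl (fun grouped row =>
      let base_name := PySem.Str.lower (PySem.Str.strip ((PySem.Dict.mk row).getD "base_name" ""))
      if base_name = "" then grouped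
      else grouped.modify base_name [] (fun g => g ++ [row])) PySem.Dict.empty
  -- OrderedDict((k, grouped[k]) for k in sorted(grouped)); every k ∈ grouped.keys, so grouped[k] = getD k []
  (PySem.List.sorted grouped.keys (fun k => k)).map (fun k => (k, grouped.getD k []))

-- ===== PORT B =====
-- key(row) = (row.get("base_name") or "").strip().lower()
def pvKey (row : List (String × String)) : String :=
  PySem.Str.lower (PySem.Str.strip ((PySem.Dict.mk row).getD "base_name" ""))

-- itertools.groupby(l, key=pvKey), each group materialized as a list
def pvGroupby : List (List (String × String)) → List (String × List (List (String × String)))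
  | [] => []
  | r :: rest =>
    let k := pvKey r
    let s := rest.span (fun r' => pvKey r' == k)
    (k, r :: s.1) :: pvGroupby s.2
termination_by l => l.length
decreasing_by
  simp only [List.span_eq_takeWhile_dropWhile, List.length_cons]
  exact Nat.lt_succ_of_le (List.length_dropWhile_le _ _)

def group_rows_by_base_name_alt (rows : List (List (String × String))) : List (String × List (List (String × String))) :=
  (pvGroupby (PySem.List.sorted rows pvKey)).filter (fun p => !(p.1 == ""))

-- ===== PRECONDITION & SPEC =====
def Spec_group_rows_by_base_name (rows : List (List (String × String))) (out : List (String × List (List (String × String)))) : Prop := out = group_rows_by_base_name_alt rows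
instance (rows : List (List (String × String))) (out : List (String × List (List (String × String)))) : Decidable (Spec_group_rows_by_base_name rows out) := by unfold Spec_group_rows_by_base_name; infer_instance

-- ===== CLAIM (what is proved, stated in full; the proofs are below) =====
def Claim_equal_group_rows_by_base_name : Prop := ∀ (rows : List (List (String × String))), Dom_group_rows_by_base_name rows → Spec_group_rows_by_base_name rows (group_rows_by_base_name rows)

-- ===== LEMMAS AND PROOFS =====

-- A's conditional grouping fold = the unconditional pair-fold over the nonempty-key rows
theorem pvFoldFilter (rows : List (List (String × String))) (d : PySem.Dict String (List (List (String × String)))) :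
    rows.foldl (fun g row => if pvKey row = "" then g
      else g.modify (pvKey row) [] (fun x => x ++ [row])) d
    = ((rows.filter (fun r => !(pvKey r == ""))).map (fun r => (pvKey r, r))).foldl
        (fun d p => d.modify p.1 [] (fun x => x ++ [p.2])) d := by
  induction rows generalizing d with
  | nil => rfl
  | cons r rs ih =>
    simp only [List.foldl_cons, List.filter_cons]
    by_cases h : pvKey r = ""
    · simp [h, ih]
    · simp [h, ih]

-- the grouped dict's entry at c : all rows with key c (c ≠ "")
theorem pvGetD (rows : List (List (String × String))) (c : String) (hc : c ≠ "") :
    (((rows.filter (fun r => !(pvKey r == ""))).map (fun r => (pvKey r, r))).foldl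
        (fun d p => d.modify p.1 [] (fun x => x ++ [p.2])) PySem.Dict.empty).getD c []
    = rows.filter (fun r => pvKey r == c) := by
  rw [PySem.Dict.getD_foldl_modify_append]
  simp only [PySem.Dict.empty, PySem.Dict.getD, PySem.Dict.get?, List.filter_map, List.map_map]
  rw [List.filter_filter]
  simp only [Function.comp_def, List.find?_nil, Option.map_none, Option.getD_none, List.nil_append,
    List.map_id_fun', id_eq]
  have : ∀ r, ((pvKey r == c) && !(pvKey r == "")) = (pvKey r == c) := by
    intro r
    by_cases h : pvKey r = c
    · simp [h, (by simpa using hc : ¬ c = "")]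
    · simp [h]
  rw [List.filter_congr (fun r _ => this r)]

-- the grouped dict's key list: first occurrences of the distinct nonempty keys
theorem pvKeys (rows : List (List (String × String))) :
    (((rows.filter (fun r => !(pvKey r == ""))).map (fun r => (pvKey r, r))).foldl
        (fun d p => d.modify p.1 [] (fun x => x ++ [p.2])) PySem.Dict.empty).keys
    = PySem.List.dedup ((rows.filter (fun r => !(pvKey r == ""))).map pvKey) := by
  rw [PySem.Dict.keys_foldl_modify_key _ Prod.fst [] (fun _ p x => x ++ [p.2])]
  simp [PySem.Dict.empty, PySem.Dict.keys, PySem.Set.update, PySem.List.dedup, PySem.Set.ofList, List.map_map, Function.comp_def]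

-- PySem.Set.ofList keeps a sublist of its input
theorem pvFoldlAddSublist {α : Type} [BEq α] (xs s : List α) :
    (xs.foldl PySem.Set.add s).Sublist (s ++ xs) := by
  induction xs generalizing s with
  | nil => simp
  | cons x xs ih =>
    have h1 : (PySem.Set.add s x).Sublist (s ++ [x]) := by
      unfold PySem.Set.add
      split_ifs with h
      · exact List.sublist_append_left s [x]
      · exact List.Sublist.refl _
    have h2 : (xs.foldl PySem.Set.add (PySem.Set.add s x)).Sublist ((PySem.Set.add s x) ++ xs) := ih _
    have h3 : ((PySem.Set.add s x) ++ xs).Sublist ((s ++ [x]) ++ xs) := h1.append_right xs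
    have := h2.trans h3
    simpa using this

theorem pvOfListSublist {α : Type} [BEq α] (xs : List α) : (PySem.Set.ofList xs).Sublist xs := by
  have := pvFoldlAddSublist xs ([] : List α)
  simpa [PySem.Set.ofList, PySem.Set.empty] using this

-- adding already-present elements leaves a set unchanged
theorem pvFoldlAddConst {α : Type} [BEq α] [LawfulBEq α] (xs : List α) (s : List α)
    (h : ∀ x ∈ xs, x ∈ s) : xs.foldl PySem.Set.add s = s := by
  induction xs with
  | nil => rfl
  | cons x xs ih =>
    have hx : PySem.Set.add s x = s := by
      unfold PySem.Set.add
      rw [if_pos ((PySem.Set.contains_iff s x).mpr (h x (by simp)))]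
    simp only [List.foldl_cons, hx]
    exact ih (fun y hy => h y (by simp [hy]))

-- a head element absent from the additions stays in front
theorem pvFoldlAddCons {α : Type} [BEq α] [LawfulBEq α] (xs : List α) (s : List α) (a : α)
    (h : ∀ x ∈ xs, x ≠ a) : xs.foldl PySem.Set.add (a :: s) = a :: xs.foldl PySem.Set.add s := by
  induction xs generalizing s with
  | nil => rfl
  | cons x xs ih =>
    have hc : PySem.Set.contains (a :: s) x = PySem.Set.contains s x := by
      have hne : ¬ (a == x) = true := by
        simpa using fun e => (h x (by simp)) e.symm
      simp [PySem.Set.contains]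
      exact fun e => absurd e (h x (by simp))
    have hx : PySem.Set.add (a :: s) x = a :: PySem.Set.add s x := by
      unfold PySem.Set.add
      rw [hc]
      by_cases hs : PySem.Set.contains s x = true
      · rw [if_pos hs, if_pos hs]
      · rw [if_neg hs, if_neg hs]
        rfl
    simp only [List.foldl_cons, hx]
    exact ih _ (fun y hy => h y (by simp [hy]))

-- stability of insertion into a sorted list, seen through a key-filter
theorem pvFilterInsertBy (x : List (String × String)) (ys : List (List (String × String)))
    (hys : ys.Pairwise (fun a b => pvKey a ≤ pvKey b)) (c : String) :
    (PySem.List.insertBy (fun a b => decide (pvKey a < pvKey b)) x ys).filter (fun a => pvKey a == c)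
    = ys.filter (fun a => pvKey a == c) ++ (if pvKey x == c then [x] else []) := by
  induction ys with
  | nil => by_cases h : pvKey x = c <;> simp [PySem.List.insertBy, h]
  | cons y ys ih =>
    have hstep : PySem.List.insertBy (fun a b => decide (pvKey a < pvKey b)) x (y :: ys)
        = if pvKey x < pvKey y then x :: y :: ys
          else y :: PySem.List.insertBy (fun a b => decide (pvKey a < pvKey b)) x ys := by
      simp [PySem.List.insertBy]
    rw [hstep]
    rcases List.pairwise_cons.mp hys with ⟨hhead, htail⟩
    by_cases hxy : pvKey x < pvKey y
    · rw [if_pos hxy]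
      have hnil : (y :: ys).filter (fun a => pvKey a == c) = []
          ∨ ¬ (pvKey x == c) = true := by
        by_cases hxc : (pvKey x == c) = true
        · left
          rw [List.filter_eq_nil_iff]
          intro a ha
          have hya : pvKey y ≤ pvKey a := by
            rcases List.mem_cons.mp ha with h | h
            · simp [h]
            · exact hhead a h
          have : pvKey x < pvKey a := lt_of_lt_of_le hxy hya
          have hne : pvKey a ≠ c := by
            intro h
            rw [h, ← (by simpa using hxc : pvKey x = c)] at this
            exact lt_irrefl _ this
          simpa using hne
        · right; exact hxc
      rcases hnil with h | h
      · rw [List.filter_cons, h]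
        by_cases hxc : (pvKey x == c) = true
        · simp [hxc]
        · simp [hxc]
      · simp [List.filter_cons, h]
    · rw [if_neg hxy]
      simp only [List.filter_cons, ih htail]
      by_cases hyc : (pvKey y == c) = true
      · simp [hyc]
      · simp [hyc]

-- stability of the sort, seen through a key-filter
theorem pvFilterSorted (xs : List (List (String × String))) (c : String) :
    (PySem.List.sorted xs pvKey).filter (fun a => pvKey a == c) = xs.filter (fun a => pvKey a == c) := by
  induction xs using List.reverseRecOn with
  | nil => rfl
  | append_singleton xs x ih =>
    have hs : PySem.List.sorted (xs ++ [x]) pvKey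
        = PySem.List.insertBy (fun a b => decide (pvKey a < pvKey b)) x (PySem.List.sorted xs pvKey) := by
      rw [PySem.List.sorted_eq_foldl_insertBy, PySem.List.sorted_eq_foldl_insertBy, List.foldl_append]
      rfl
    rw [hs, pvFilterInsertBy x _ (PySem.List.sorted_pairwise xs pvKey) c, ih, List.filter_append]
    by_cases h : (pvKey x == c) = true <;> simp [h]

-- after dropping the leading k0-run of a key-sorted list, every key is strictly above k0
theorem pvDropWhileGt (rest : List (List (String × String))) (k0 : String)
    (hpair : rest.Pairwise (fun a b => pvKey a ≤ pvKey b))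
    (hlb : ∀ a ∈ rest, k0 ≤ pvKey a) :
    ∀ a ∈ rest.dropWhile (fun r' => pvKey r' == k0), k0 < pvKey a := by
  induction rest with
  | nil => simp
  | cons y ys ih =>
    rcases List.pairwise_cons.mp hpair with ⟨hy, hys⟩
    rw [List.dropWhile_cons]
    by_cases hyk : (pvKey y == k0) = true
    · rw [if_pos hyk]
      exact ih hys (fun a ha => hlb a (by simp [ha]))
    · rw [if_neg hyk]
      intro a ha
      have hygt : k0 < pvKey y :=
        lt_of_le_of_ne (hlb y (by simp)) (fun e => hyk (by simp [e.symm]))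
      rcases List.mem_cons.mp ha with h | h
      · rw [h]; exact hygt
      · exact lt_of_lt_of_le hygt (hy a h)

-- groupby on a key-sorted list = one group per distinct key, holding the key's filter
set_option maxHeartbeats 1000000 in
theorem pvGroupbyChar (l : List (List (String × String)))
    (hl : l.Pairwise (fun a b => pvKey a ≤ pvKey b)) :
    pvGroupby l = (PySem.List.dedup (l.map pvKey)).map (fun k => (k, l.filter (fun r => pvKey r == k))) := by
  match l with
  | [] =>
    rw [pvGroupby]
    rfl
  | r :: rest =>
    rcases List.pairwise_cons.mp hl with ⟨hhead, hpair⟩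
    have hrw : pvGroupby (r :: rest)
        = (pvKey r, r :: rest.takeWhile (fun r' => pvKey r' == pvKey r))
          :: pvGroupby (rest.dropWhile (fun r' => pvKey r' == pvKey r)) := by
      rw [pvGroupby]
      simp [List.span_eq_takeWhile_dropWhile]
    set k0 := pvKey r with hk0
    set tw := rest.takeWhile (fun r' => pvKey r' == k0) with htw
    set dw := rest.dropWhile (fun r' => pvKey r' == k0) with hdw
    have hg : ∀ a ∈ tw, pvKey a = k0 := by
      intro a ha
      have := List.mem_takeWhile_imp ha
      simpa using this
    have hdsub : dw.Sublist rest := List.dropWhile_sublist _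
    have hdpair : dw.Pairwise (fun a b => pvKey a ≤ pvKey b) := hpair.sublist hdsub
    have ht : ∀ a ∈ dw, k0 < pvKey a := pvDropWhileGt rest k0 hpair hhead
    have hsplit : rest = tw ++ dw := (List.takeWhile_append_dropWhile).symm
    -- the k0 group = first element plus the taken run
    have hfilk0 : (r :: rest).filter (fun a => pvKey a == k0) = r :: tw := by
      rw [List.filter_cons, if_pos (by simp [hk0])]
      congr 1
      rw [hsplit, List.filter_append]
      have h1 : tw.filter (fun a => pvKey a == k0) = tw :=
        List.filter_eq_self.mpr (fun a ha => by simp [hg a ha])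
      have h2 : dw.filter (fun a => pvKey a == k0) = [] :=
        List.filter_eq_nil_iff.mpr (fun a ha => by simp [ne_of_gt (ht a ha)])
      rw [h1, h2, List.append_nil]
    -- dedup of the key list
    have hded : PySem.List.dedup ((r :: rest).map pvKey) = k0 :: PySem.List.dedup (dw.map pvKey) := by
      have h1 : ∀ x ∈ tw.map pvKey, x ∈ ([k0] : List String) := by
        intro x hx
        rcases List.mem_map.mp hx with ⟨a, ha, rfl⟩
        simp [hg a ha]
      have h2 : ∀ x ∈ dw.map pvKey, x ≠ k0 := by
        intro x hx
        rcases List.mem_map.mp hx with ⟨a, ha, rfl⟩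
        exact (ne_of_gt (ht a ha))
      simp only [List.map_cons, hsplit, List.map_append, PySem.List.dedup, PySem.Set.ofList,
        List.foldl_cons, List.foldl_append]
      have e0 : PySem.Set.add PySem.Set.empty k0 = [k0] := rfl
      rw [e0, pvFoldlAddConst _ _ h1, pvFoldlAddCons _ _ _ h2]
      rfl
    have htail : pvGroupby dw
        = (PySem.List.dedup (dw.map pvKey)).map (fun k => (k, (r :: rest).filter (fun a => pvKey a == k))) := by
      rw [pvGroupbyChar dw hdpair]
      apply List.map_congr_left
      intro k hk
      have hkmem : k ∈ dw.map pvKey := (PySem.List.mem_dedup (dw.map pvKey) k).mp hk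
      have hkgt : k0 < k := by
        rcases List.mem_map.mp hkmem with ⟨a, ha, rfl⟩
        exact ht a ha
      have hfil : (r :: rest).filter (fun a => pvKey a == k) = dw.filter (fun a => pvKey a == k) := by
        rw [List.filter_cons, if_neg (by simp [← hk0]; exact ne_of_lt hkgt), hsplit, List.filter_append]
        have h1 : tw.filter (fun a => pvKey a == k) = [] :=
          List.filter_eq_nil_iff.mpr (fun a ha => by simp [hg a ha]; exact ne_of_lt hkgt)
        rw [h1, List.nil_append]
      rw [hfil]
    rw [hrw, hded, List.map_cons, ← hfilk0, htail]
termination_by l.length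
decreasing_by
  simp only [List.length_cons]
  exact Nat.lt_succ_of_le (List.length_dropWhile_le _ _)

-- the sorted distinct nonempty keys, computed A's way and B's way, coincide
theorem pvKeyLists (rows : List (List (String × String))) :
    PySem.List.sorted (PySem.List.dedup ((rows.filter (fun r => !(pvKey r == ""))).map pvKey)) (fun k => k)
    = (PySem.List.dedup ((PySem.List.sorted rows pvKey).map pvKey)).filter (fun k => !(k == "")) := by
  have hnodKB : ((PySem.List.dedup ((PySem.List.sorted rows pvKey).map pvKey)).filter (fun k => !(k == ""))).Nodup := by
    apply List.Nodup.filter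
    simp [PySem.List.dedup]
  have hnodK : (PySem.List.dedup ((rows.filter (fun r => !(pvKey r == ""))).map pvKey)).Nodup := by
    simp [PySem.List.dedup]
  apply PySem.List.sorted_eq_of_perm_of_pairwise_lt
  · apply (List.perm_ext_iff_of_nodup hnodKB hnodK).mpr
    intro k
    simp only [List.mem_filter, PySem.List.mem_dedup, List.mem_map, PySem.List.mem_sorted]
    constructor
    · rintro ⟨⟨a, ha, rfl⟩, hne⟩
      exact ⟨a, ⟨ha, hne⟩, rfl⟩
    · rintro ⟨a, ⟨ha, hne⟩, rfl⟩
      exact ⟨⟨a, ha, rfl⟩, hne⟩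
  · have hsub1 : ((PySem.List.dedup ((PySem.List.sorted rows pvKey).map pvKey)).filter (fun k => !(k == ""))).Sublist
        (PySem.List.dedup ((PySem.List.sorted rows pvKey).map pvKey)) := List.filter_sublist
    have hsub2 : (PySem.List.dedup ((PySem.List.sorted rows pvKey).map pvKey)).Sublist
        ((PySem.List.sorted rows pvKey).map pvKey) := pvOfListSublist _
    have hle : ((PySem.List.dedup ((PySem.List.sorted rows pvKey).map pvKey)).filter (fun k => !(k == ""))).Pairwise
        (fun a b => a ≤ b) :=
      ((PySem.List.sorted_map_key_pairwise rows pvKey).sublist (hsub1.trans hsub2))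
    have hne : ((PySem.List.dedup ((PySem.List.sorted rows pvKey).map pvKey)).filter (fun k => !(k == ""))).Pairwise
        (fun a b => a ≠ b) := hnodKB
    exact (hle.and hne).imp (fun h => lt_of_le_of_ne h.1 h.2)

-- the master equation, stated over the pvKey-normalized form of A (definitionally equal to A)
theorem pvMain (rows : List (List (String × String))) :
    (let grouped := rows.foldl (fun g row => if pvKey row = "" then g
        else g.modify (pvKey row) [] (fun x => x ++ [row])) PySem.Dict.empty
     (PySem.List.sorted grouped.keys (fun k => k)).map (fun k => (k, grouped.getD k [])))
    = group_rows_by_base_name_alt rows := by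
  simp only []
  rw [pvFoldFilter, pvKeys, pvKeyLists]
  unfold group_rows_by_base_name_alt
  rw [pvGroupbyChar _ (PySem.List.sorted_pairwise rows pvKey), List.filter_map]
  apply List.map_congr_left
  intro k hk
  have hkne : k ≠ "" := by
    simpa using (List.mem_filter.mp hk).2
  rw [pvGetD rows k hkne, pvFilterSorted]

-- ===== VERDICT (by name: the statement is the Claim_ definition above) =====
theorem group_rows_by_base_name_spec : Claim_equal_group_rows_by_base_name := by
  intro rows _
  exact pvMain rows
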